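-- pv_equiv track=rewrite | github.com/pgrady1322/strandweaver | strandweaver/assembly_utils/gap_filler.py | _build_kmer_set
-- ===== SOURCE A (Python) =====
-- def _build_kmer_set(sequence: str, k: int) -> set:
--     """Return a set of k-mers in *sequence* (uppercase, skip Ns)."""
--     s = set()
--     seq_upper = sequence.upper()
--     for i in range(len(seq_upper) - k + 1):
--         kmer = seq_upper[i:i + k]
--         if 'N' not in kmer:
--             s.add(kmer)
--     return s
-- ===== SOURCE B (Python) =====
-- def _build_kmer_set(sequence: str, k: int) -> set:
--     """Return a set of k-mers in *sequence* (uppercase, skip Ns).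
--
--     One left-to-right pass tracking the index of the most recent 'N':
--     a window ending at e is N-free iff the last 'N' lies before its start,
--     so no per-window 'N' membership scan is needed.
--     For k < 0 this returns the empty set (no k-mer has negative length).
--     """
--     if k < 0:
--         return set()
--     seq = sequence.upper()
--     out = set()
--     last_n = -1  # index of the most recent 'N' seen so far
--     for e in range(len(seq) + 1):
--         if e > 0 and seq[e - 1] == 'N':
--             last_n = e - 1
--         if e >= k and last_n < e - k:
--             out.add(seq[e - k:e])
--     return out
-- ===== Notes on version B (the rewrite author's own statement) =====
-- stated objective: alternative
-- what changed: B replaces A's per-window 'N'-membership scan by a single left-to-right pass that tracks the index of the most recent 'N', adding a window exactly when the last 'N' lies before its start; for k < 0 B returns the empty set instead of A's accidental slices (stated as D_).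
-- intended difference: For k < 0, A returns a nonempty set of accidental variable-length slices (always containing '') produced by Python's negative slice-index wraparound; B returns the empty set, the intended value since no k-mer of negative length exists. — e.g. on _build_kmer_set("AN", -1): A returns ["A", ""], B returns []
import Mathlib
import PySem

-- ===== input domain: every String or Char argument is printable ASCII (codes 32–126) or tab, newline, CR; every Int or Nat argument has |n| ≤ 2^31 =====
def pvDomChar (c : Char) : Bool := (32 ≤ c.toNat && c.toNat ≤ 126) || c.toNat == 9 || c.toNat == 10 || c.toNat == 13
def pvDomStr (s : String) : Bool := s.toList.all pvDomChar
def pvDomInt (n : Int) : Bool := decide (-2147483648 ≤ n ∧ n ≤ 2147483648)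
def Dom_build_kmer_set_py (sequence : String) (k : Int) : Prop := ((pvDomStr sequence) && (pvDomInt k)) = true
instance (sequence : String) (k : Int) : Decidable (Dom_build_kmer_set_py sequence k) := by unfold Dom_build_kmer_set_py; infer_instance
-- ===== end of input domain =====

-- B replaces the per-window 'N'-membership scan by a single pass that tracks the index of
-- the most recent 'N'; for k < 0 B returns the empty set (stated as intended difference D_).

-- ===== PORT A =====
def build_kmer_set_py (sequence : String) (k : Int) : List String :=
  let seq_upper := PySem.Str.upper sequence
  (PySem.List.pyRange 0 ((PySem.Str.len seq_upper : Int) - k + 1)).foldl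
    (fun s i =>
      let kmer := PySem.Str.slice seq_upper (some i) (some (i + k))
      if PySem.Str.isIn "N" kmer then s else PySem.Set.add s kmer)
    ([] : PySem.Set String)

-- ===== PORT B =====
def build_kmer_set_py_alt (sequence : String) (k : Int) : List String :=
  if k < 0 then []
  else
    let seq := PySem.Str.upper sequence
    let st := (PySem.List.pyRange 0 ((PySem.Str.len seq : Int) + 1)).foldl
      (fun st e =>
        let last_n : Int := if 0 < e ∧ PySem.Str.pyGet? seq (e - 1) = some 'N' then e - 1 else st.1
        let out := if k ≤ e ∧ last_n < e - k then
            PySem.Set.add st.2 (PySem.Str.slice seq (some (e - k)) (some e))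
          else st.2
        (last_n, out))
      ((-1 : Int), ([] : PySem.Set String))
    st.2

-- ===== PRECONDITION & SPEC =====
-- For k < 0, A returns a nonempty set of accidental variable-length slices (always containing
-- "") produced by Python's negative slice-index wraparound; B returns the empty set, the
-- intended value since no k-mer of negative length exists.
def D_build_kmer_set_py (sequence : String) (k : Int) : Prop := k < 0
instance (sequence : String) (k : Int) : Decidable (D_build_kmer_set_py sequence k) := by
  unfold D_build_kmer_set_py; infer_instance

def Spec_build_kmer_set_py (sequence : String) (k : Int) (out : List String) : Prop :=
  ¬ D_build_kmer_set_py sequence k → out = build_kmer_set_py_alt sequence k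
instance (sequence : String) (k : Int) (out : List String) : Decidable (Spec_build_kmer_set_py sequence k out) := by
  unfold Spec_build_kmer_set_py; infer_instance

def pvDiffWitness_build_kmer_set_py : String × Int := ("AN", -1)
def pvDiffWitnessOut_build_kmer_set_py : (List String) × (List String) := (["A", ""], [])

-- ===== CLAIM (what is proved, stated in full; the proofs are below) =====
def Claim_unchanged_build_kmer_set_py : Prop := ∀ (sequence : String) (k : Int), Dom_build_kmer_set_py sequence k → Spec_build_kmer_set_py sequence k (build_kmer_set_py sequence k)
def Claim_changed_build_kmer_set_py : Prop := Dom_build_kmer_set_py (pvDiffWitness_build_kmer_set_py.1) (pvDiffWitness_build_kmer_set_py.2) ∧ D_build_kmer_set_py (pvDiffWitness_build_kmer_set_py.1) (pvDiffWitness_build_kmer_set_py.2) ∧ build_kmer_set_py (pvDiffWitness_build_kmer_set_py.1) (pvDiffWitness_build_kmer_set_py.2) = pvDiffWitnessOut_build_kmer_set_py.1 ∧ build_kmer_set_py_alt (pvDiffWitness_build_kmer_set_py.1) (pvDiffWitness_build_kmer_set_py.2) = pvDiffWitnessOut_build_kmer_set_py.2 ∧ pvDiffWitnessOut_build_kmer_set_py.1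 ≠ pvDiffWitnessOut_build_kmer_set_py.2
def Claim_exact_build_kmer_set_py : Prop := ∀ (sequence : String) (k : Int), Dom_build_kmer_set_py sequence k → D_build_kmer_set_py sequence k → build_kmer_set_py sequence k ≠ build_kmer_set_py_alt sequence k

-- ===== LEMMAS AND PROOFS =====

-- index of the last 'N' among the first e characters of U (-1 if none): B's tracked state
def lastNSpec (U : List Char) : Nat → Int
  | 0 => -1
  | e + 1 => if U[e]? = some 'N' then (e : Int) else lastNSpec U e

lemma lastNSpec_lt_iff (U : List Char) (e i : Nat) :
    lastNSpec U e < (i : Int) ↔ ∀ j, i ≤ j → j < e → ¬ U[j]? = some 'N' := by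
  induction e with
  | zero => simp [lastNSpec]; omega
  | succ e ih =>
    by_cases h : U[e]? = some 'N'
    · simp only [lastNSpec, if_pos h]
      constructor
      · intro hlt j hij hje
        have he : e < i := by exact_mod_cast hlt
        omega
      · intro hall
        by_contra hlt
        have hie : i ≤ e := by omega
        exact hall e hie (Nat.lt_succ_self e) h
    · simp only [lastNSpec, if_neg h]
      rw [ih]
      constructor
      · intro hall j hij hje
        rcases Nat.lt_succ_iff_lt_or_eq.mp hje with h' | h'
        · exact hall j hij h'
        · subst h'; exact h
      · intro hall j hij hje; exact hall j hij (by omega)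

-- fold of conditional Set.add = fold of Set.add over the filtered, mapped list
lemma foldl_addif {α : Type} [BEq α] (q : Nat → Bool) (f : Nat → α) (l : List Nat) (s : PySem.Set α) :
    l.foldl (fun s i => if q i then s else PySem.Set.add s (f i)) s
      = ((l.filter (fun i => !q i)).map f).foldl PySem.Set.add s := by
  induction l generalizing s with
  | nil => rfl
  | cons x xs ih =>
    by_cases h : q x <;> simp [List.foldl_cons, h, ih]

lemma filterMap_if_eq_map_filter {α : Type} (p : Nat → Bool) (f : Nat → α) (l : List Nat) :
    l.filterMap (fun i => if p i then some (f i) else none) = (l.filter p).map f := by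
  induction l with
  | nil => rfl
  | cons x xs ih => by_cases h : p x <;> simp [h, ih]

-- pyRange with a nonpositive stop is empty
lemma pyRange_zero_nonpos (m : Int) (h : m ≤ 0) : PySem.List.pyRange 0 m = [] := by
  simp only [PySem.List.pyRange]
  norm_num
  intro h2; omega

-- the k-mer window starting at i, and A's per-window skip test
abbrev fWin (u : String) (kn : Nat) (i : Nat) : String :=
  PySem.Str.slice u (some (i : Int)) (some ((i : Int) + (kn : Int)))

abbrev qN (u : String) (kn : Nat) (i : Nat) : Bool :=
  PySem.Str.isIn "N" (fWin u kn i)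

-- the element (if any) that B's step at index e adds
def BListF (u : String) (kn : Nat) (e : Nat) : Option String :=
  if (kn : Int) ≤ (e : Int) ∧ lastNSpec u.toList e < (e : Int) - (kn : Int) then
    some (PySem.Str.slice u (some ((e : Int) - (kn : Int))) (some (e : Int)))
  else none

lemma lastN_step (u : String) (m : Nat) :
    (if 0 < (m : Int) ∧ PySem.Str.pyGet? u ((m : Int) - 1) = some 'N' then (m : Int) - 1
     else lastNSpec u.toList (m - 1)) = lastNSpec u.toList m := by
  cases m with
  | zero => simp [lastNSpec]
  | succ m' =>
    have h1 : ((m' + 1 : Nat) : Int) - 1 = (m' : Int) := by push_cast; ring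
    have h0 : (0 : Int) < ((m' + 1 : Nat) : Int) := by positivity
    by_cases h : u.toList[m']? = some 'N'
    · rw [if_pos ⟨h0, by rw [h1, PySem.Str.pyGet?_natCast]; exact h⟩]
      simp [lastNSpec, h]
    · rw [if_neg (by rw [h1, PySem.Str.pyGet?_natCast]; exact fun ⟨_, hh⟩ => h hh)]
      simp [lastNSpec, h]

-- B's loop invariant: after the first m iterations the state is the last-'N' index of the
-- first m-1 characters together with the set of windows added so far
lemma B_inv (u : String) (kn : Nat) (m : Nat) :
    List.foldl
      (fun (st : Int × PySem.Set String) (e : Int) =>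
        ((if 0 < e ∧ PySem.Str.pyGet? u (e - 1) = some 'N' then e - 1 else st.1),
         (if (kn : Int) ≤ e ∧
              (if 0 < e ∧ PySem.Str.pyGet? u (e - 1) = some 'N' then e - 1 else st.1) < e - (kn : Int) then
            PySem.Set.add st.2 (PySem.Str.slice u (some (e - (kn : Int))) (some e))
          else st.2)))
      ((-1 : Int), ([] : PySem.Set String))
      (List.map (fun (j : Nat) => (j : Int)) (List.range m))
    = (lastNSpec u.toList (m - 1),
       ((List.range m).filterMap (BListF u kn)).foldl PySem.Set.add []) := by
  induction m with
  | zero => simp [lastNSpec]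
  | succ m ih =>
    rw [List.range_succ, List.map_append, List.foldl_append, ih, List.filterMap_append,
      List.foldl_append]
    simp only [List.map_cons, List.map_nil, List.foldl_cons, List.foldl_nil]
    rw [lastN_step u m]
    have hsub : m + 1 - 1 = m := rfl
    rw [hsub]
    by_cases hc : (kn : Int) ≤ (m : Int) ∧ lastNSpec u.toList m < (m : Int) - (kn : Int)
    · have hc' : kn ≤ m ∧ lastNSpec u.toList m < (m : Int) - (kn : Int) :=
        ⟨by exact_mod_cast hc.1, hc.2⟩
      simp [BListF, hc']
    · have hc' : ¬(kn ≤ m ∧ lastNSpec u.toList m < (m : Int) - (kn : Int)) :=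
        fun h => hc ⟨by exact_mod_cast h.1, h.2⟩
      simp [BListF, hc']

-- B's skip condition coincides with A's 'N'-membership test
lemma cond_iff (u : String) (kn i : Nat) :
    (lastNSpec u.toList (kn + i) < (i : Int)) ↔ qN u kn i = false := by
  rw [lastNSpec_lt_iff]
  show _ ↔ PySem.Str.isIn "N" (fWin u kn i) = false
  rw [← Bool.not_eq_true, PySem.Str.isIn_iff_infix]
  have hcast : ((i : Int) + (kn : Int)) = ((i + kn : Nat) : Int) := by push_cast; ring
  have htl : (fWin u kn i).toList = List.take kn (List.drop i u.toList) := by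
    rw [show (fWin u kn i) = PySem.Str.slice u (some (i : Int)) (some ((i : Int) + (kn : Int))) from rfl,
      PySem.Str.toList_slice, PySem.Chars.slice_eq_listSlice, hcast, PySem.List.slice_natCast]
    congr 1
    omega
  rw [htl, show "N".toList = ['N'] from rfl, List.singleton_infix_iff, List.mem_iff_getElem?]
  simp only [List.getElem?_take, List.getElem?_drop]
  constructor
  · rintro hall ⟨j, hj⟩
    by_cases hjk : j < kn
    · rw [if_pos hjk] at hj
      exact hall (i + j) (by omega) (by omega) hj
    · rw [if_neg hjk] at hj
      simp at hj
  · intro hnex j hij hje hj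
    exact hnex ⟨j - i, by rw [if_pos (by omega), show i + (j - i) = j from by omega]; exact hj⟩

-- B's insertion list over the whole scan is A's filtered window list
lemma lists_eq (u : String) (kn : Nat) :
    (List.range (u.toList.length + 1)).filterMap (BListF u kn)
    = ((List.range (u.toList.length + 1 - kn)).filter (fun i => !qN u kn i)).map (fWin u kn) := by
  by_cases hkn : kn ≤ u.toList.length + 1
  · have hsplit : u.toList.length + 1 = kn + (u.toList.length + 1 - kn) := by omega
    rw [hsplit, List.range_add, List.filterMap_append, List.filterMap_map,
      show (List.range kn).filterMap (BListF u kn) = [] from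
        List.filterMap_eq_nil_iff.mpr (by
          intro e he
          rw [List.mem_range] at he
          exact if_neg (fun ⟨h1, _⟩ => by omega)),
      List.nil_append, ← filterMap_if_eq_map_filter (fun i => !qN u kn i) (fWin u kn),
      show kn + (u.toList.length + 1 - kn) - kn = u.toList.length + 1 - kn from by omega]
    apply List.filterMap_congr
    intro i _
    simp only [Function.comp]
    unfold BListF
    have e1 : ((kn + i : Nat) : Int) - (kn : Int) = (i : Int) := by push_cast; ring
    have e2 : ((kn + i : Nat) : Int) = (i : Int) + (kn : Int) := by push_cast; ring
    by_cases hq : qN u kn i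
    · rw [if_neg (fun ⟨_, hlt⟩ => by
        rw [e1] at hlt
        exact absurd hq (by rw [← Bool.not_eq_false]; exact fun hf => hf ((cond_iff u kn i).mp hlt))),
        if_neg (by
          simp only [qN, fWin, PySem.Str.isIn_eq, PySem.Str.toList_slice,
            PySem.Chars.slice_eq_listSlice, show "N".toList = ['N'] from rfl] at hq
          simpa using hq)]
    · rw [if_pos ⟨by push_cast; omega, by
          rw [e1]
          exact (cond_iff u kn i).mpr (Bool.eq_false_iff.mpr hq)⟩,
        if_pos (by
          simp only [qN, fWin, PySem.Str.isIn_eq, PySem.Str.toList_slice,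
            PySem.Chars.slice_eq_listSlice, show "N".toList = ['N'] from rfl] at hq
          simpa using hq)]
      rw [e1, e2]
  · have h0 : u.toList.length + 1 - kn = 0 := by omega
    rw [h0]
    simp only [List.range_zero, List.filter_nil, List.map_nil]
    exact List.filterMap_eq_nil_iff.mpr (by
      intro e he
      rw [List.mem_range] at he
      exact if_neg (fun ⟨h1, _⟩ => by omega))

theorem build_kmer_set_py_main (sequence : String) (k : Int) (hk : 0 ≤ k) :
    build_kmer_set_py sequence k = build_kmer_set_py_alt sequence k := by
  lift k to ℕ using hk with kn
  have hB : build_kmer_set_py_alt sequence (kn : Int)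
      = ((List.range ((PySem.Str.upper sequence).toList.length + 1)).filterMap
          (BListF (PySem.Str.upper sequence) kn)).foldl PySem.Set.add [] := by
    unfold build_kmer_set_py_alt
    rw [if_neg (by omega : ¬((kn : Int) < 0))]
    simp only [PySem.Str.len_eq]
    rw [show ((((PySem.Str.upper sequence).toList.length : Int)) + 1)
        = (((PySem.Str.upper sequence).toList.length + 1 : Nat) : Int) from by push_cast; ring,
      PySem.List.pyRange_zero_natCast, B_inv]
  have hA : build_kmer_set_py sequence (kn : Int)
      = (((List.range ((PySem.Str.upper sequence).toList.length + 1 - kn)).filter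
            (fun i => !qN (PySem.Str.upper sequence) kn i)).map
          (fWin (PySem.Str.upper sequence) kn)).foldl PySem.Set.add [] := by
    unfold build_kmer_set_py
    simp only [PySem.Str.len_eq]
    by_cases hkn : kn ≤ (PySem.Str.upper sequence).toList.length + 1
    · rw [show (((PySem.Str.upper sequence).toList.length : Int) - (kn : Int) + 1)
          = (((PySem.Str.upper sequence).toList.length + 1 - kn : Nat) : Int) from by omega,
        PySem.List.pyRange_zero_natCast, List.foldl_map]
      exact foldl_addif (qN (PySem.Str.upper sequence) kn) (fWin (PySem.Str.upper sequence) kn) _ _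
    · rw [pyRange_zero_nonpos _ (by omega), show (PySem.Str.upper sequence).toList.length + 1 - kn = 0 from by omega]
      simp
  rw [hA, hB, lists_eq]

-- ===== VERDICT =====
theorem build_kmer_set_py_spec : Claim_unchanged_build_kmer_set_py := by
  intro sequence k _ hD
  exact build_kmer_set_py_main sequence k (by unfold D_build_kmer_set_py at hD; omega)

theorem build_kmer_set_py_changed : Claim_changed_build_kmer_set_py := by
  unfold Claim_changed_build_kmer_set_py; decide

lemma set_add_ne_nil {α : Type} [BEq α] (s : PySem.Set α) (x : α) :
    PySem.Set.add s x ≠ [] := by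
  unfold PySem.Set.add
  split
  · rename_i h
    intro hnil
    subst hnil
    simp [PySem.Set.contains] at h
  · simp

theorem build_kmer_set_py_tight : Claim_exact_build_kmer_set_py := by
  intro sequence k _ hD
  unfold D_build_kmer_set_py at hD
  have hB : build_kmer_set_py_alt sequence k = [] := by
    unfold build_kmer_set_py_alt
    rw [if_pos hD]
  rw [hB]
  unfold build_kmer_set_py
  simp only [PySem.Str.len_eq]
  rw [PySem.List.pyRange_one_succ_right (by omega :
    (0 : Int) ≤ ((PySem.Str.upper sequence).toList.length : Int) - k)]
  rw [List.foldl_append, List.foldl_cons, List.foldl_nil]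
  have htl : (PySem.Str.slice (PySem.Str.upper sequence)
      (some (((PySem.Str.upper sequence).toList.length : Int) - k))
      (some (((PySem.Str.upper sequence).toList.length : Int) - k + k))).toList = [] := by
    rw [PySem.Str.toList_slice, PySem.Chars.slice_eq_listSlice,
      show (((PySem.Str.upper sequence).toList.length : Int) - k + k)
        = (((PySem.Str.upper sequence).toList.length : Nat) : Int) from by ring,
      show (((PySem.Str.upper sequence).toList.length : Int) - k)
        = (((PySem.Str.upper sequence).toList.length + (-k).toNat : Nat) : Int) from by omega,
      PySem.List.slice_natCast,
      show (PySem.Str.upper sequence).toList.length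
          - ((PySem.Str.upper sequence).toList.length + (-k).toNat) = 0 from by omega]
    simp
  rw [if_neg (by
    rw [PySem.Str.isIn_iff_infix, htl, show "N".toList = ['N'] from rfl,
      List.singleton_infix_iff]
    simp)]
  exact set_add_ne_nil _ _
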